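-- pv_equiv track=rewrite | github.com/madulinux/testcase-rod_cutting_algorithm | src/utils/test_utils.py | format_cut_pattern
-- ===== SOURCE A (Python) =====
-- def format_cut_pattern(cuts):
--     """
--     Format pola pemotongan dengan cara yang lebih informatif.
--
--     Format output: "[length_1] + [length_2] + ... = [total_length]"
--     Contoh: "3 + 3 + 2 = 8"
--
--     Args:
--         cuts (list): Daftar panjang potongan
--
--     Returns:
--         str: String terformat yang menggambarkan pola pemotongan
--     """
--     if not cuts:
--         return "[]"
--
--     # Hitung frekuensi setiap panjang
--     from collections import Counter
--     freq = Counter(cuts)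
--
--     # Format output
--     pattern = []
--     for length, count in sorted(freq.items()):
--         if count > 1:
--             pattern.append(f"{length}x{count}")
--         else:
--             pattern.append(str(length))
--
--     return "[" + ", ".join(pattern) + "]"
-- ===== SOURCE B (Python) =====
-- def format_cut_pattern(cuts):
--     """Sort once, then scan the sorted list grouping runs of equal values
--     (run-length encoding) instead of building a Counter and sorting its keys."""
--     if not cuts:
--         return "[]"
--     xs = sorted(cuts)
--     runs = []
--     prev, cnt = xs[0], 1
--     for v in xs[1:]:
--         if v == prev:
--             cnt += 1
--         else:
--             runs.append((prev, cnt))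
--             prev, cnt = v, 1
--     runs.append((prev, cnt))
--     parts = [f"{v}x{c}" if c > 1 else str(v) for v, c in runs]
--     return "[" + ", ".join(parts) + "]"
-- ===== Notes on version B (the rewrite author's own statement) =====
-- stated objective: faster
-- what changed: Replaces Counter(cuts) plus sorting the (length,count) items by sorting the list once and run-length grouping consecutive equal values in one linear scan.
import Mathlib
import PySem

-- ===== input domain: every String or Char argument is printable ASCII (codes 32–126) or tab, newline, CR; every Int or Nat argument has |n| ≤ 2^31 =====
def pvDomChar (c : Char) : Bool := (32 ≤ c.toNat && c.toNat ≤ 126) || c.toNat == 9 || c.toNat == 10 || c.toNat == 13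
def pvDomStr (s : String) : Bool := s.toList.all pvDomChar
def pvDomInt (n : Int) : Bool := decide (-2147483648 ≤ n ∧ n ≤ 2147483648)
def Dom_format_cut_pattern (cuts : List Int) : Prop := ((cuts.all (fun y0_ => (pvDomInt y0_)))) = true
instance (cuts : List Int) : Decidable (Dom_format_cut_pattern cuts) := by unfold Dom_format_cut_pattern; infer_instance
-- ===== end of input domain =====

-- B replaces A's Counter-then-sort-the-keys pass by sorting the list once and run-length
-- grouping consecutive equal values in a single scan (objective: alternative decomposition).

-- ===== PORT A =====
-- A: Counter(cuts), then for (length, count) in sorted(freq.items()) append the part.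
def format_cut_pattern (cuts : List Int) : String :=
  if cuts = [] then "[]"
  else
    let freq := PySem.Dict.counter cuts
    let pattern := (PySem.List.sorted2 freq.items Prod.fst Prod.snd false).foldl
      (fun acc p =>
        acc ++ [if p.2 > 1 then PySem.Int.toStr p.1 ++ "x" ++ PySem.Int.toStr p.2
                else PySem.Int.toStr p.1]) []
    "[" ++ PySem.Str.join ", " pattern ++ "]"

-- ===== PORT B =====
-- B: xs = sorted(cuts); one pass collecting (prev, cnt) runs; then format each run.
def format_cut_pattern_alt (cuts : List Int) : String :=
  if cuts = [] then "[]"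
  else
    match PySem.List.sorted cuts (fun x => x) false with
    | [] => "[]"  -- unreachable (sorted of a nonempty list is nonempty); totality guard only
    | x :: tail =>
      let st := tail.foldl
        (fun (st : List (Int × Int) × Int × Int) v =>
          if v = st.2.1 then (st.1, st.2.1, st.2.2 + 1)
          else (st.1 ++ [(st.2.1, st.2.2)], v, 1)) ([], x, (1 : Int))
      let runs := st.1 ++ [(st.2.1, st.2.2)]
      "[" ++ PySem.Str.join ", "
        (runs.map (fun p =>
          if p.2 > 1 then PySem.Int.toStr p.1 ++ "x" ++ PySem.Int.toStr p.2
          else PySem.Int.toStr p.1)) ++ "]"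

-- ===== PRECONDITION & SPEC =====
def Spec_format_cut_pattern (cuts : List Int) (out : String) : Prop := out = format_cut_pattern_alt cuts
instance (cuts : List Int) (out : String) : Decidable (Spec_format_cut_pattern cuts out) := by unfold Spec_format_cut_pattern; infer_instance

-- ===== CLAIM (what is proved, stated in full; the proofs are below) =====
def Claim_equal_format_cut_pattern : Prop := ∀ (cuts : List Int), Dom_format_cut_pattern cuts → Spec_format_cut_pattern cuts (format_cut_pattern cuts)

-- ===== LEMMAS AND PROOFS =====

-- run-length grouping of a list, starting from a current run (prev, cnt): proof-side model of B's loop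
def pvRunsWith (prev cnt : Int) : List Int → List (Int × Int)
  | [] => [(prev, cnt)]
  | y :: ys => if y = prev then pvRunsWith prev (cnt + 1) ys
               else (prev, cnt) :: pvRunsWith y 1 ys

-- B's fold computes pvRunsWith
theorem pv_foldl_runs (s : List Int) : ∀ (parts : List (Int × Int)) (prev cnt : Int),
    (let st := s.foldl
        (fun (st : List (Int × Int) × Int × Int) v =>
          if v = st.2.1 then (st.1, st.2.1, st.2.2 + 1)
          else (st.1 ++ [(st.2.1, st.2.2)], v, 1)) (parts, prev, cnt)
     st.1 ++ [(st.2.1, st.2.2)]) = parts ++ pvRunsWith prev cnt s := by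
  induction s with
  | nil => intro parts prev cnt; simp [pvRunsWith]
  | cons y ys ih =>
    intro parts prev cnt
    by_cases h : y = prev <;> simp [pvRunsWith, h, List.foldl_cons, ih]

theorem pv_mem_runsWith {prev cnt : Int} {s : List Int} {p : Int × Int}
    (h : p ∈ pvRunsWith prev cnt s) : p.1 = prev ∨ p.1 ∈ s := by
  induction s generalizing prev cnt with
  | nil => simp [pvRunsWith] at h; simp [h]
  | cons y ys ih =>
    simp only [pvRunsWith] at h
    split at h
    · rcases ih h with h' | h'
      · exact Or.inl h'
      · exact Or.inr (List.mem_cons_of_mem _ h')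
    · rcases List.mem_cons.1 h with h' | h'
      · exact Or.inl (by rw [h'])
      · rcases ih h' with h'' | h''
        · exact Or.inr (by simp [h''])
        · exact Or.inr (List.mem_cons_of_mem _ h'')

theorem pv_runsWith_pairwise (s : List Int) : ∀ (prev cnt : Int),
    s.Pairwise (· ≤ ·) → (∀ y ∈ s, prev ≤ y) →
    (pvRunsWith prev cnt s).Pairwise (fun a b => a.1 < b.1) := by
  induction s with
  | nil => intro prev cnt _ _; simp [pvRunsWith]
  | cons y ys ih =>
    intro prev cnt hp hge
    rw [List.pairwise_cons] at hp
    simp only [pvRunsWith]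
    split
    · exact ih prev (cnt + 1) hp.2 (fun z hz => le_trans (hge y (by simp)) (hp.1 z hz))
    · rename_i hne
      refine List.pairwise_cons.2 ⟨?_, ih y 1 hp.2 (fun z hz => hp.1 z hz)⟩
      intro p hpmem
      have hy : prev < y := lt_of_le_of_ne (hge y (by simp)) (fun h => hne h.symm)
      rcases pv_mem_runsWith hpmem with h' | h'
      · simpa [h'] using hy
      · exact lt_of_lt_of_le hy (hp.1 _ h')

theorem pv_runsWith_perm (s : List Int) : ∀ (prev cnt : Int) (L : List Int) (c : Int → Int),
    s.Pairwise (· ≤ ·) → (∀ y ∈ s, prev ≤ y) → L.Nodup →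
    (∀ k, k ∈ L ↔ (k = prev ∨ k ∈ s)) →
    c prev = cnt + (s.count prev : Int) →
    (∀ k ∈ L, k ≠ prev → c k = (s.count k : Int)) →
    (pvRunsWith prev cnt s).Perm (L.map (fun k => (k, c k))) := by
  induction s with
  | nil =>
    intro prev cnt L c _ _ hnd hmem hc1 _
    have hL : L = [prev] := by
      cases L with
      | nil => exact absurd ((hmem prev).2 (Or.inl rfl)) (by simp)
      | cons a l =>
        have ha : a = prev := by
          rcases (hmem a).1 (by simp) with h | h
          · exact h
          · simp at h
        cases l with
        | nil => simp [ha]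
        | cons b l' =>
          have hb : b = prev := by
            rcases (hmem b).1 (by simp) with h | h
            · exact h
            · simp at h
          rw [List.nodup_cons] at hnd
          exact absurd (by simp [ha, hb] : a ∈ b :: l') hnd.1
    simp [pvRunsWith, hL, hc1]
  | cons y ys ih =>
    intro prev cnt L c hp hge hnd hmem hc1 hc2
    rw [List.pairwise_cons] at hp
    simp only [pvRunsWith]
    split
    · rename_i hy
      subst hy
      refine ih y (cnt + 1) L c hp.2 hp.1 hnd ?_ ?_ ?_
      · intro k
        rw [hmem k]
        constructor
        · rintro (h | h)
          · exact Or.inl h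
          · simp at h; tauto
        · rintro (h | h)
          · exact Or.inl h
          · exact Or.inr (by simp [h])
      · rw [hc1]; simp; ring
      · intro k hk hkne
        rw [hc2 k hk hkne, List.count_cons]
        simp [Ne.symm hkne]
    · rename_i hne
      have hy : prev < y := lt_of_le_of_ne (hge y (by simp)) (fun h => hne h.symm)
      have hnotmem : prev ∉ y :: ys := by
        intro h
        rcases List.mem_cons.1 h with h | h
        · omega
        · have := hp.1 prev h
          omega
      have hprevL : prev ∈ L := (hmem prev).2 (Or.inl rfl)
      have hperm1 : L.Perm (prev :: L.erase prev) := List.perm_cons_erase hprevL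
      have hcprev : c prev = cnt := by
        rw [hc1, List.count_eq_zero.2 hnotmem]; simp
      have hstep : (pvRunsWith y 1 ys).Perm ((L.erase prev).map (fun k => (k, c k))) := by
        refine ih y 1 (L.erase prev) c hp.2 hp.1 (hnd.erase prev) ?_ ?_ ?_
        · intro k
          rw [hnd.mem_erase_iff, hmem k]
          constructor
          · rintro ⟨hkne, h | h⟩
            · exact absurd h hkne
            · rcases List.mem_cons.1 h with h | h
              · exact Or.inl h
              · exact Or.inr h
          · rintro (h | h)
            · subst h; exact ⟨hne, Or.inr (by simp)⟩
            · refine ⟨?_, Or.inr (by simp [h])⟩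
              intro hk; subst hk
              exact hnotmem (by simp [h])
        · have hyL : y ∈ L.erase prev :=
            (hnd.mem_erase_iff).2 ⟨hne, (hmem y).2 (Or.inr (by simp))⟩
          rw [hc2 y ((hnd.mem_erase_iff).1 hyL).2 hne, List.count_cons]
          simp
          omega
        · intro k hk hkne
          have hk' := (hnd.mem_erase_iff).1 hk
          rw [hc2 k hk'.2 hk'.1, List.count_cons]
          simp [Ne.symm hkne]
      refine List.Perm.trans ?_ (hperm1.map (fun k => (k, c k))).symm
      have : (prev :: L.erase prev).map (fun k => (k, c k))
          = (prev, cnt) :: (L.erase prev).map (fun k => (k, c k)) := by simp [hcprev]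
      rw [this]
      exact hstep.cons _

-- the lexicographic comparator sorted2 uses on (Int × Int)
theorem pv_insertBy_pairwise (lt : Int × Int → Int × Int → Bool)
    (hasym : ∀ a b, lt a b = true → lt b a = false)
    (htr : ∀ x y z, lt x y = true → lt z y = false → lt z x = false) :
    ∀ (acc : List (Int × Int)) (x : Int × Int),
      acc.Pairwise (fun a b => lt b a = false) →
      (PySem.List.insertBy lt x acc).Pairwise (fun a b => lt b a = false) := by
  intro acc
  induction acc with
  | nil => intro x _; simp [PySem.List.insertBy]
  | cons y ys ih =>
    intro x hp
    rw [List.pairwise_cons] at hp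
    simp only [PySem.List.insertBy]
    split
    · rename_i hlt
      refine List.pairwise_cons.2 ⟨?_, List.pairwise_cons.2 hp⟩
      intro z hz
      rcases List.mem_cons.1 hz with h | h
      · subst h; exact hasym _ _ hlt
      · exact htr x y z hlt (hp.1 z h)
    · rename_i hlt
      refine List.pairwise_cons.2 ⟨?_, ih x hp.2⟩
      intro z hz
      rcases (PySem.List.mem_insertBy lt x z ys).1 hz with h | h
      · subst h; simpa using hlt
      · exact hp.1 z h

theorem pv_foldl_insertBy_pairwise (lt : Int × Int → Int × Int → Bool)
    (hasym : ∀ a b, lt a b = true → lt b a = false)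
    (htr : ∀ x y z, lt x y = true → lt z y = false → lt z x = false) :
    ∀ (xs : List (Int × Int)) (acc : List (Int × Int)),
      acc.Pairwise (fun a b => lt b a = false) →
      (xs.foldl (fun acc x => PySem.List.insertBy lt x acc) acc).Pairwise
        (fun a b => lt b a = false) := by
  intro xs
  induction xs with
  | nil => intro acc h; simpa using h
  | cons x xs ih =>
    intro acc h
    exact ih _ (pv_insertBy_pairwise lt hasym htr acc x h)

-- the pairs lists the two ports format agree
theorem pv_pairs_eq (cuts : List Int) (x : Int) (tail : List Int)
    (hs : PySem.List.sorted cuts (fun x => x) false = x :: tail) :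
    PySem.List.sorted2 (PySem.Dict.counter cuts).items Prod.fst Prod.snd false
      = pvRunsWith x 1 tail := by
  have hperm : (PySem.List.sorted cuts (fun x => x) false).Perm cuts :=
    PySem.List.sorted_perm cuts (fun x => x) false
  have hpw : (x :: tail).Pairwise (· ≤ ·) := by
    have := PySem.List.sorted_pairwise cuts (fun x => x)
    rwa [hs] at this
  rw [hs] at hperm
  rw [List.pairwise_cons] at hpw
  -- the comparator sorted2 uses
  set lt : Int × Int → Int × Int → Bool := fun a b =>
    decide (a.1 < b.1) || (!decide (b.1 < a.1) && decide (a.2 < b.2)) with hlt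
  have hasym : ∀ a b, lt a b = true → lt b a = false := by
    intro a b h
    rw [hlt] at h ⊢
    simp at h ⊢
    omega
  have htr : ∀ p q r, lt p q = true → lt r q = false → lt r p = false := by
    intro p q r h1 h2
    rw [hlt] at h1 h2 ⊢
    simp at h1 h2 ⊢
    omega
  have hs2 : PySem.List.sorted2 (PySem.Dict.counter cuts).items Prod.fst Prod.snd false
      = (PySem.Dict.counter cuts).items.foldl
          (fun acc x => PySem.List.insertBy lt x acc) [] := by
    simp [PySem.List.sorted2, hlt]
  refine List.Perm.eq_of_pairwise (le := fun a b => lt b a = false) ?_ ?_ ?_ ?_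
  · intro a b _ _ hab hba
    rw [hlt] at hab hba
    simp at hab hba
    exact Prod.ext (by omega) (by omega)
  · rw [hs2]
    exact pv_foldl_insertBy_pairwise lt hasym htr _ [] (by simp)
  · refine (pv_runsWith_pairwise tail x 1 hpw.2 hpw.1).imp ?_
    intro a b h
    rw [hlt]
    simp
    omega
  · have h1 : (PySem.List.sorted2 (PySem.Dict.counter cuts).items Prod.fst Prod.snd false).Perm
        (PySem.Dict.counter cuts).items :=
      PySem.List.sorted2_perm _ _ _ _
    have h2 : (pvRunsWith x 1 tail).Perm
        ((PySem.Set.ofList cuts).map (fun k => (k, (cuts.count k : Int)))) := by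
      refine pv_runsWith_perm tail x 1 (PySem.Set.ofList cuts)
        (fun k => (cuts.count k : Int)) hpw.2 hpw.1 (PySem.Set.nodup_ofList cuts) ?_ ?_ ?_
      · intro k
        rw [PySem.Set.mem_ofList]
        rw [← hperm.mem_iff]
        simp
      · show ((cuts.count x : Int)) = 1 + (tail.count x : Int)
        have := hperm.count_eq x
        simp at this
        omega
      · intro k _ hkne
        show ((cuts.count k : Int)) = (tail.count k : Int)
        have := hperm.count_eq k
        rw [← this, List.count_cons]
        simp [Ne.symm hkne]
    have h3 : (PySem.Dict.counter cuts).items.Perm (pvRunsWith x 1 tail) := by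
      rw [PySem.Dict.items_counter]
      exact h2.symm
    exact h1.trans h3

-- ===== VERDICT (by name: the statement is the Claim_ definition above) =====
theorem format_cut_pattern_spec : Claim_equal_format_cut_pattern := by
  intro cuts _
  unfold Spec_format_cut_pattern format_cut_pattern format_cut_pattern_alt
  by_cases hnil : cuts = []
  · simp [hnil]
  · simp only [hnil, if_false]
    have hsn : PySem.List.sorted cuts (fun x => x) false ≠ [] := by
      rw [Ne, PySem.List.sorted_eq_nil_iff]; exact hnil
    obtain ⟨x, tail, hs⟩ : ∃ x tail, PySem.List.sorted cuts (fun x => x) false = x :: tail := by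
      cases h : PySem.List.sorted cuts (fun x => x) false with
      | nil => exact absurd h hsn
      | cons a l => exact ⟨a, l, rfl⟩
    rw [hs]
    simp only
    rw [pv_foldl_runs tail [] x 1, PySem.List.foldl_append_singleton_eq_map]
    rw [pv_pairs_eq cuts x tail hs]
    simp
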